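-- pv_equiv track=rewrite | github.com/anshikaCSE007/DSA | Arrays/closestMinMAx/closestMinMax.py | solve
-- ===== SOURCE A (Python) =====
-- def solve(A):
--     n = len(A);
--     maxN = max(A);
--     minN = min(A);
--     ans = n;
--     maxi = -1;
--     mini = -1;
--     if(maxN == minN):
--         return 1;
--     for i in range(n-1, -1, -1):
--         if(A[i] == maxN):
--             maxi = i;
--
--         elif(A[i] == minN):
--             mini = i;
--
--         if(maxi != -1 and mini != -1):
--             l = abs(maxi - mini) + 1;
--
--             ans = min(ans, l);
--
--     return ans;
-- ===== SOURCE B (Python) =====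
-- def solve(A):
--     maxN = max(A)
--     minN = min(A)
--     if maxN == minN:
--         return 1
--     maxPos = [i for i, x in enumerate(A) if x == maxN]
--     minPos = [i for i, x in enumerate(A) if x == minN]
--     best = len(A)
--     p = 0
--     q = 0
--     while p < len(maxPos) and q < len(minPos):
--         best = min(best, abs(maxPos[p] - minPos[q]) + 1)
--         if maxPos[p] < minPos[q]:
--             p += 1
--         else:
--             q += 1
--     return best
-- ===== Notes on version B (the rewrite author's own statement) =====
-- stated objective: alternative
-- what changed: Replaces A's backward scan with running nearest-max/nearest-min state by building the ascending occurrence-index lists of the maximum and minimum once and two-pointer merging them, taking min(|p-q|+1) while advancing the smaller index.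
import Mathlib
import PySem

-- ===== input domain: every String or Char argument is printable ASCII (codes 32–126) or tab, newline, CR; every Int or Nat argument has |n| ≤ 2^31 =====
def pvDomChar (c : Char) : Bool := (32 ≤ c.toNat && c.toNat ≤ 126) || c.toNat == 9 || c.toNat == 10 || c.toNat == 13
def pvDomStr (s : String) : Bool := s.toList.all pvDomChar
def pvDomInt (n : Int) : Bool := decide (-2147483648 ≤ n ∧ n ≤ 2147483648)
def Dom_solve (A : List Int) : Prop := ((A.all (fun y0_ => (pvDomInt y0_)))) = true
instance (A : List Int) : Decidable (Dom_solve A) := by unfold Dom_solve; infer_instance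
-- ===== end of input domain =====

-- B replaces A's backward scan with occurrence-index lists and a two-pointer merge (alternative decomposition, same O(n) cost).

-- ===== PORT A =====
-- the loop body of A, step for step (ans, maxi, mini)
def solveStep (A : List Int) (maxN minN : Int) (st : Int × Int × Int) (i : Int) : Int × Int × Int :=
  let ans := st.1
  let maxi := st.2.1
  let mini := st.2.2
  let ai := PySem.List.pyGetD A i 0
  let mm : Int × Int := if ai = maxN then (i, mini) else if ai = minN then (maxi, i) else (maxi, mini)
  let ans := if mm.1 ≠ -1 ∧ mm.2 ≠ -1 then min ans (|mm.1 - mm.2| + 1) else ans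
  (ans, mm.1, mm.2)

def solve (A : List Int) : Int :=
  let n : Int := A.length
  match PySem.List.max? A (fun x => x), PySem.List.min? A (fun x => x) with
  | some maxN, some minN =>
    if maxN = minN then 1
    else
      let st := (PySem.List.pyRange (n - 1) (-1) (-1)).foldl (solveStep A maxN minN) (n, -1, -1)
      st.1
  | _, _ => 0

-- ===== PORT B =====
-- two-pointer merge of the two ascending index lists (the while loop of Source B)
def twoPtr : List Int → List Int → Int → Int
  | p :: ps, q :: qs, best =>
      let best := min best (|p - q| + 1)
      if p < q then twoPtr ps (q :: qs) best else twoPtr (p :: ps) qs best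
  | _, _, best => best

-- body of Source B once max(A)/min(A) are known (Source B raises on [], mirrored by the getD 0 fallback below)
def solveAltCore (A : List Int) (maxN minN : Int) : Int :=
  if maxN = minN then 1
  else
    let maxPos := (PySem.List.enumerate A 0).filterMap (fun ix => if ix.2 = maxN then some ix.1 else none)
    let minPos := (PySem.List.enumerate A 0).filterMap (fun ix => if ix.2 = minN then some ix.1 else none)
    twoPtr maxPos minPos (A.length : Int)

def solve_alt (A : List Int) : Int :=
  (((PySem.List.max? A (fun x => x)).bind
      (fun maxN => (PySem.List.min? A (fun x => x)).map
        (fun minN => solveAltCore A maxN minN)))).getD 0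

-- ===== PRECONDITION & SPEC =====
-- Python A raises ValueError (max of an empty sequence) on the empty list, and so does B; every nonempty list returns.
def Pre_solve (A : List Int) : Prop := A ≠ []
instance (A : List Int) : Decidable (Pre_solve A) := by unfold Pre_solve; infer_instance
def pvWitness_solve : List Int := [1, 3, 2]

def Spec_solve (A : List Int) (out : Int) : Prop := out = solve_alt A
instance (A : List Int) (out : Int) : Decidable (Spec_solve A out) := by unfold Spec_solve; infer_instance

-- ===== CLAIM (what is proved, stated in full; the proofs are below) =====
def Claim_equal_solve : Prop := ∀ (A : List Int), Dom_solve A → Pre_solve A → Spec_solve A (solve A)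

-- ===== LEMMAS AND PROOFS =====

-- min over all pairs |p - q| + 1, folded into b (the common spec of both ports)
def crossMin (P Q : List Int) (b : Int) : Int :=
  P.foldl (fun acc p => Q.foldl (fun a q => min a (|p - q| + 1)) acc) b

-- list of positions (starting index s) of value v in l, ascending
def posList (v : Int) : List Int → Int → List Int
  | [], _ => []
  | x :: xs, s => if x = v then s :: posList v xs (s + 1) else posList v xs (s + 1)

lemma foldl_min_init_comm (f : Int → Int) (L : List Int) (b c : Int) :
    L.foldl (fun a x => min a (f x)) (min b c) = min c (L.foldl (fun a x => min a (f x)) b) := by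
  induction L generalizing b with
  | nil => simp [min_comm]
  | cons x t ih =>
      simp only [List.foldl_cons]
      rw [show min (min b c) (f x) = min (min b (f x)) c by
        rw [min_assoc, min_comm c (f x), ← min_assoc], ih]

lemma foldl_min_absorb (f : Int → Int) (L : List Int) (b : Int)
    (h : ∀ x ∈ L, b ≤ f x) :
    L.foldl (fun a x => min a (f x)) b = b := by
  induction L generalizing b with
  | nil => rfl
  | cons x t ih =>
      simp only [List.foldl_cons]
      rw [min_eq_left (h x (by simp))]
      exact ih _ (fun y hy => h y (by simp [hy]))

lemma foldl_min_head (f : Int → Int) (x : Int) (t : List Int) (b : Int)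
    (h : ∀ y ∈ t, f x ≤ f y) :
    (x :: t).foldl (fun a y => min a (f y)) b = min b (f x) := by
  simp only [List.foldl_cons]
  exact foldl_min_absorb f t (min b (f x)) (fun y hy => le_trans (min_le_right _ _) (h y hy))

lemma foldl_min_comm2 (f g : Int → Int) (L M : List Int) (c : Int) :
    L.foldl (fun a x => min a (f x)) (M.foldl (fun a y => min a (g y)) c)
      = M.foldl (fun a y => min a (g y)) (L.foldl (fun a x => min a (f x)) c) := by
  induction L generalizing c with
  | nil => rfl
  | cons x t ih =>
      simp only [List.foldl_cons]
      rw [show min (M.foldl (fun a y => min a (g y)) c) (f x)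
            = M.foldl (fun a y => min a (g y)) (min c (f x)) by
          rw [foldl_min_init_comm, min_comm]]
      exact ih _

lemma foldl_min_le_init (f : Int → Int) (L : List Int) (b : Int) :
    L.foldl (fun a x => min a (f x)) b ≤ b := by
  induction L generalizing b with
  | nil => simp
  | cons x t ih => exact le_trans (ih _) (min_le_left _ _)

lemma foldl_min_le_mem (f : Int → Int) (L : List Int) (b x : Int) (hx : x ∈ L) :
    L.foldl (fun a y => min a (f y)) b ≤ f x := by
  induction L generalizing b with
  | nil => cases hx
  | cons y t ih =>
      simp only [List.foldl_cons]
      rcases List.mem_cons.1 hx with h | h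
      · subst h; exact le_trans (foldl_min_le_init _ _ _) (min_le_right _ _)
      · exact ih _ h

lemma crossMin_nil_right (P : List Int) (b : Int) : crossMin P [] b = b := by
  induction P generalizing b with
  | nil => rfl
  | cons p t ih => exact ih b

lemma crossMin_cons_left (p : Int) (P Q : List Int) (b : Int) :
    crossMin (p :: P) Q b = crossMin P Q (Q.foldl (fun a q => min a (|p - q| + 1)) b) := rfl

lemma crossMin_cons_right (q : Int) (P Q : List Int) (b : Int) :
    crossMin P (q :: Q) b = crossMin P Q (P.foldl (fun a p => min a (|p - q| + 1)) b) := by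
  induction P generalizing b with
  | nil => rfl
  | cons p t ih =>
      rw [crossMin_cons_left, List.foldl_cons, ih, crossMin_cons_left, List.foldl_cons]
      congr 1
      exact foldl_min_comm2 (fun p' => |p' - q| + 1) (fun q' => |p - q'| + 1) t Q _

lemma crossMin_min_init (P Q : List Int) (b x : Int) :
    crossMin P Q (min b x) = min x (crossMin P Q b) := by
  induction P generalizing b with
  | nil => simp [crossMin, min_comm]
  | cons p t ih =>
      rw [crossMin_cons_left, crossMin_cons_left, foldl_min_init_comm, min_comm x, ih]

lemma crossMin_le_init (P Q : List Int) (b : Int) : crossMin P Q b ≤ b := by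
  induction P generalizing b with
  | nil => simp [crossMin]
  | cons p t ih =>
      rw [crossMin_cons_left]
      exact le_trans (ih _) (foldl_min_le_init _ _ _)

lemma crossMin_le_pair (P Q : List Int) (b p q : Int) (hp : p ∈ P) (hq : q ∈ Q) :
    crossMin P Q b ≤ |p - q| + 1 := by
  induction P generalizing b with
  | nil => cases hp
  | cons y t ih =>
      rw [crossMin_cons_left]
      rcases List.mem_cons.1 hp with h | h
      · subst h
        exact le_trans (crossMin_le_init _ _ _) (foldl_min_le_mem _ _ _ _ hq)
      · exact ih _ h

lemma posList_mem_ge (v : Int) (l : List Int) (s : Int) :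
    ∀ x ∈ posList v l s, s ≤ x := by
  induction l generalizing s with
  | nil => intro x hx; cases hx
  | cons y t ih =>
      intro x hx
      simp only [posList] at hx
      split at hx
      · rcases List.mem_cons.1 hx with h | h
        · omega
        · have := ih (s + 1) x h; omega
      · have := ih (s + 1) x hx; omega

lemma posList_pairwise (v : Int) (l : List Int) (s : Int) :
    (posList v l s).Pairwise (· ≤ ·) := by
  induction l generalizing s with
  | nil => exact List.Pairwise.nil
  | cons y t ih =>
      simp only [posList]
      split
      · exact List.pairwise_cons.2 ⟨fun x hx => by have := posList_mem_ge v t (s + 1) x hx; omega, ih _⟩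
      · exact ih _

-- two-pointer merge computes the min over all pairs (sorted inputs)
lemma twoPtr_eq_crossMin : ∀ (n : Nat) (P Q : List Int), P.length + Q.length ≤ n →
    P.Pairwise (· ≤ ·) → Q.Pairwise (· ≤ ·) → ∀ b, twoPtr P Q b = crossMin P Q b := by
  intro n
  induction n with
  | zero =>
      intro P Q h _ _ b
      have hP : P = [] := List.eq_nil_of_length_eq_zero (by omega)
      have hQ : Q = [] := List.eq_nil_of_length_eq_zero (by omega)
      subst hP; subst hQ; simp [twoPtr, crossMin]
  | succ n ih =>
      intro P Q hlen hP hQ b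
      match P, Q with
      | [], Q => simp [twoPtr, crossMin]
      | p :: ps, [] => rw [crossMin_nil_right]; simp [twoPtr]
      | p :: ps, q :: qs =>
          rw [twoPtr]
          rcases List.pairwise_cons.1 hP with ⟨hp1, hps⟩
          rcases List.pairwise_cons.1 hQ with ⟨hq1, hqs⟩
          split
          · -- p < q : advance p
            rename_i hpq
            rw [ih ps (q :: qs) (by simp at hlen ⊢; omega) hps hQ,
                crossMin_cons_left,
                foldl_min_head (fun q' => |p - q'| + 1) q qs b
                  (fun y hy => by show |p - q| + 1 ≤ |p - y| + 1
                                  have : q ≤ y := hq1 y hy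
                                  have h1 : |p - q| = q - p := by rw [abs_sub_comm]; exact abs_of_nonneg (by omega)
                                  have h2 : |p - y| = y - p := by rw [abs_sub_comm]; exact abs_of_nonneg (by omega)
                                  omega)]
          · -- q ≤ p : advance q
            rename_i hpq
            push Not at hpq
            rw [ih (p :: ps) qs (by simp at hlen ⊢; omega) hP hqs,
                crossMin_cons_right,
                foldl_min_head (fun p' => |p' - q| + 1) p ps b
                  (fun y hy => by show |p - q| + 1 ≤ |y - q| + 1
                                  have := hp1 y hy
                                  have h1 : |p - q| = p - q := abs_of_nonneg (by omega)
                                  have h2 : |y - q| = y - q := abs_of_nonneg (by omega)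
                                  omega)]

-- B's comprehension over enumerate is posList
lemma filterMap_enumerate_eq_posList (v : Int) (A : List Int) : ∀ (s : Int),
    (PySem.List.enumerate A s).filterMap (fun ix => if ix.2 = v then some ix.1 else none)
      = posList v A s := by
  induction A with
  | nil => intro s; rfl
  | cons x t ih =>
      intro s
      rw [PySem.List.enumerate_cons, List.filterMap_cons]
      by_cases h : x = v <;> simp [posList, h, ih]

-- A's backward loop, run from index n-1 down to k, as a foldr over [k..n-1]
lemma loop_inv (A : List Int) (maxN minN : Int) (hne : maxN ≠ minN) :
    ∀ (d k : Nat), k + d = A.length →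
    List.foldr (fun (i : Int) st => solveStep A maxN minN st i)
        ((A.length : Int), -1, -1) ((List.range' k d).map (fun (i : Nat) => (i : Int)))
      = (crossMin (posList maxN (A.drop k) (k : Int)) (posList minN (A.drop k) (k : Int)) (A.length : Int),
         (posList maxN (A.drop k) (k : Int)).headD (-1),
         (posList minN (A.drop k) (k : Int)).headD (-1)) := by
  intro d
  induction d with
  | zero =>
      intro k hk
      have hdrop : A.drop k = [] := List.drop_of_length_le (by omega)
      simp [hdrop, posList, crossMin]
  | succ d ih =>
      intro k hk
      have hklt : k < A.length := by omega
      have hstep := ih (k + 1) (by omega)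
      rw [List.range'_succ, List.map_cons, List.foldr_cons, hstep]
      have hdrop : A.drop k = A[k] :: A.drop (k + 1) := List.drop_eq_getElem_cons hklt
      have hc : ((k + 1 : Nat) : Int) = (k : Int) + 1 := by push_cast; ring
      have hai : PySem.List.pyGetD A ((k : Nat) : Int) 0 = A[k] := by
        rw [PySem.List.pyGetD_natCast]; exact List.getD_eq_getElem A 0 hklt
      by_cases h1 : A[k] = maxN
      · -- max branch: maxi := k
        have h1' : A[k] ≠ minN := by rw [h1]; exact hne
        have hPM : posList maxN (A.drop k) (k : Int)
            = (k : Int) :: posList maxN (A.drop (k + 1)) ((k + 1 : Nat) : Int) := by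
          rw [hdrop]; simp [posList, h1, hc]
        have hPm : posList minN (A.drop k) (k : Int)
            = posList minN (A.drop (k + 1)) ((k + 1 : Nat) : Int) := by
          rw [hdrop]; simp [posList, h1', hc]
        rw [hPM, hPm]
        simp only [solveStep, hai, if_pos h1]
        cases hQ : posList minN (A.drop (k + 1)) ((k + 1 : Nat) : Int) with
        | nil =>
            simp only [List.headD_nil]
            have : ¬ (((k : Nat) : Int) ≠ -1 ∧ (-1 : Int) ≠ -1) := by simp
            rw [if_neg this]
            simp [crossMin_nil_right]
        | cons q rest =>
            have hq_ge : ((k + 1 : Nat) : Int) ≤ q := by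
              apply posList_mem_ge minN (A.drop (k + 1)) _ q; rw [hQ]; exact List.mem_cons_self
            have hkq : (k : Int) < q := by omega
            have hcond : (((k : Nat) : Int) ≠ -1 ∧ ((q :: rest).headD (-1) : Int) ≠ -1) := by
              constructor
              · have : (0 : Int) ≤ (k : Int) := Int.natCast_nonneg k
                omega
              · simp only [List.headD_cons]; omega
            rw [if_pos hcond]
            have hpw := posList_pairwise minN (A.drop (k + 1)) ((k + 1 : Nat) : Int)
            rw [hQ] at hpw
            rcases List.pairwise_cons.1 hpw with ⟨hq1, _⟩
            rw [crossMin_cons_left,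
                foldl_min_head (fun q' => |(k : Int) - q'| + 1) q rest _
                  (fun y hy => by
                    show |(k : Int) - q| + 1 ≤ |(k : Int) - y| + 1
                    have hqy := hq1 y hy
                    have e1 : |(k : Int) - q| = q - (k : Int) := by
                      rw [abs_sub_comm]; exact abs_of_nonneg (by omega)
                    have e2 : |(k : Int) - y| = y - (k : Int) := by
                      rw [abs_sub_comm]; exact abs_of_nonneg (by omega)
                    omega),
                crossMin_min_init]
            simp [min_comm]
      · by_cases h2 : A[k] = minN
        · -- min branch: mini := k
          have hPM : posList maxN (A.drop k) (k : Int)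
              = posList maxN (A.drop (k + 1)) ((k + 1 : Nat) : Int) := by
            rw [hdrop]; simp [posList, h1, hc]
          have hPm : posList minN (A.drop k) (k : Int)
              = (k : Int) :: posList minN (A.drop (k + 1)) ((k + 1 : Nat) : Int) := by
            rw [hdrop]; simp [posList, h2, hc]
          rw [hPM, hPm]
          simp only [solveStep, hai, if_neg h1, if_pos h2]
          cases hP : posList maxN (A.drop (k + 1)) ((k + 1 : Nat) : Int) with
          | nil =>
              simp only [List.headD_nil]
              have : ¬ ((-1 : Int) ≠ -1 ∧ ((k : Nat) : Int) ≠ -1) := by simp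
              rw [if_neg this]
              simp [crossMin]
          | cons p rest =>
              have hp_ge : ((k + 1 : Nat) : Int) ≤ p := by
                apply posList_mem_ge maxN (A.drop (k + 1)) _ p; rw [hP]; exact List.mem_cons_self
              have hkp : (k : Int) < p := by omega
              have hcond : (((p :: rest).headD (-1) : Int) ≠ -1 ∧ ((k : Nat) : Int) ≠ -1) := by
                constructor
                · simp only [List.headD_cons]; omega
                · have : (0 : Int) ≤ (k : Int) := Int.natCast_nonneg k
                  omega
              rw [if_pos hcond]
              have hpw := posList_pairwise maxN (A.drop (k + 1)) ((k + 1 : Nat) : Int)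
              rw [hP] at hpw
              rcases List.pairwise_cons.1 hpw with ⟨hp1, _⟩
              rw [crossMin_cons_right,
                  foldl_min_head (fun p' => |p' - (k : Int)| + 1) p rest _
                    (fun y hy => by
                      show |p - (k : Int)| + 1 ≤ |y - (k : Int)| + 1
                      have hpy := hp1 y hy
                      have e1 : |p - (k : Int)| = p - (k : Int) := abs_of_nonneg (by omega)
                      have e2 : |y - (k : Int)| = y - (k : Int) := abs_of_nonneg (by omega)
                      omega),
                  crossMin_min_init]
              simp only [List.headD_cons]
              rw [show |p - (k : Int)| = |(p :: rest).headD (-1) - (k : Int)| by simp]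
              simp [min_comm]
        · -- neither branch: state unchanged
          have hPM : posList maxN (A.drop k) (k : Int)
              = posList maxN (A.drop (k + 1)) ((k + 1 : Nat) : Int) := by
            rw [hdrop]; simp [posList, h1, hc]
          have hPm : posList minN (A.drop k) (k : Int)
              = posList minN (A.drop (k + 1)) ((k + 1 : Nat) : Int) := by
            rw [hdrop]; simp [posList, h2, hc]
          rw [hPM, hPm]
          simp only [solveStep, hai, if_neg h1, if_neg h2]
          by_cases hcond :
              ((posList maxN (A.drop (k + 1)) ((k + 1 : Nat) : Int)).headD (-1) ≠ -1 ∧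
               (posList minN (A.drop (k + 1)) ((k + 1 : Nat) : Int)).headD (-1) ≠ -1)
          · rw [if_pos hcond]
            have hPne : posList maxN (A.drop (k + 1)) ((k + 1 : Nat) : Int) ≠ [] := by
              intro h; rw [h] at hcond; simp at hcond
            have hQne : posList minN (A.drop (k + 1)) ((k + 1 : Nat) : Int) ≠ [] := by
              intro h; rw [h] at hcond; simp at hcond
            have hPmem : (posList maxN (A.drop (k + 1)) ((k + 1 : Nat) : Int)).headD (-1)
                ∈ posList maxN (A.drop (k + 1)) ((k + 1 : Nat) : Int) := by
              cases hp : posList maxN (A.drop (k + 1)) ((k + 1 : Nat) : Int) with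
              | nil => exact absurd hp hPne
              | cons a t => simp
            have hQmem : (posList minN (A.drop (k + 1)) ((k + 1 : Nat) : Int)).headD (-1)
                ∈ posList minN (A.drop (k + 1)) ((k + 1 : Nat) : Int) := by
              cases hp : posList minN (A.drop (k + 1)) ((k + 1 : Nat) : Int) with
              | nil => exact absurd hp hQne
              | cons a t => simp
            have hle := crossMin_le_pair _ _ ((A.length : Int)) _ _ hPmem hQmem
            rw [min_eq_left hle]
          · rw [if_neg hcond]

-- ===== VERDICT (by name: the statement is the Claim_ definition above) =====
theorem solve_spec : Claim_equal_solve := by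
  unfold Claim_equal_solve
  intro A _ hpre
  unfold Spec_solve solve solve_alt solveAltCore
  cases hmax : PySem.List.max? A (fun x => x) with
  | none => exact absurd ((PySem.List.max?_eq_none_iff A (fun x => x)).1 hmax) hpre
  | some maxN =>
  cases hmin : PySem.List.min? A (fun x => x) with
  | none => exact absurd ((PySem.List.min?_eq_none_iff A (fun x => x)).1 hmin) hpre
  | some minN =>
  simp only [Option.bind_some, Option.map_some, Option.getD_some]
  by_cases heq : maxN = minN
  · simp [heq]
  · rw [if_neg heq, if_neg heq]
    rw [filterMap_enumerate_eq_posList, filterMap_enumerate_eq_posList]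
    rw [twoPtr_eq_crossMin ((posList maxN A 0).length + (posList minN A 0).length) _ _
          le_rfl (posList_pairwise _ _ _) (posList_pairwise _ _ _)]
    have hrange : PySem.List.pyRange ((A.length : Int) - 1) (-1) (-1)
        = ((List.range' 0 A.length).map (fun (i : Nat) => (i : Int))).reverse := by
      rw [show ((-1 : Int)) = (-1 : Int) from rfl]
      rw [PySem.List.pyRange_neg_one_eq_reverse]
      congr 1
      rw [show (-1 : Int) + 1 = 0 by ring, show (A.length : Int) - 1 + 1 = (A.length : Int) by ring]
      rw [PySem.List.pyRange_one, List.range_eq_range']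
      simp
    rw [hrange, List.foldl_reverse]
    have := loop_inv A maxN minN heq A.length 0 (by omega)
    simp only [Nat.cast_zero, List.drop_zero] at this
    rw [show (List.foldr (fun (i : Int) st => solveStep A maxN minN st i)
          ((A.length : Int), -1, -1) ((List.range' 0 A.length).map (fun (i : Nat) => (i : Int))))
        = (List.foldr (fun (x : Int) (y : Int × Int × Int) => solveStep A maxN minN y x)
          ((A.length : Int), -1, -1) ((List.range' 0 A.length).map (fun (i : Nat) => (i : Int)))) from rfl] at this
    rw [this]
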